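-- pv_equiv track=rewrite | github.com/odoo/odoo | addons/l10n_be_hr_payroll/wizard/hr_payroll_employee_departure_notice.py | _find_week
-- ===== SOURCE A (Python) =====
-- def _find_week(duration_worked_month, leaving_type):
--     if leaving_type == 'resigned':
--         duration_notice = [(3, 1), (6, 2), (9, 3), (12, 4), (18, 5), (24, 6), (36, 7), (48, 8),
--             (60, 9), (72, 10), (84, 11), (96, 12), (108, 13)]
--     else:
--         duration_notice = [(3, 1), (4, 3), (5, 4), (6, 5), (9, 6), (12, 7), (15, 8), (18, 9),
--             (21, 10), (24, 11), (36, 12), (48, 13), (60, 15), (72, 18), (84, 21), (96, 24),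
--             (108, 27), (120, 30), (132, 33), (144, 36), (156, 39), (168, 42), (180, 45), (192, 48),
--             (204, 51), (216, 54), (228, 57), (240, 60), (252, 62), (264, 63), (276, 64), (288, 65)]
--     for duration in duration_notice:
--         last_valid = duration[1]
--         if duration[0] > duration_worked_month:
--             return last_valid
--     return last_valid
-- ===== SOURCE B (Python) =====
-- _RES_T = [3, 6, 9, 12, 18, 24, 36, 48, 60, 72, 84, 96, 108]
-- _RES_W = [1, 2, 3, 4, 5, 6, 7, 8, 9, 10, 11, 12, 13]
-- _OTH_T = [3, 4, 5, 6, 9, 12, 15, 18, 21, 24, 36, 48, 60, 72, 84, 96,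
--           108, 120, 132, 144, 156, 168, 180, 192, 204, 216, 228, 240,
--           252, 264, 276, 288]
-- _OTH_W = [1, 3, 4, 5, 6, 7, 8, 9, 10, 11, 12, 13, 15, 18, 21, 24,
--           27, 30, 33, 36, 39, 42, 45, 48, 51, 54, 57, 60, 62, 63, 64, 65]
--
-- def _find_week(duration_worked_month, leaving_type):
--     if leaving_type == 'resigned':
--         th, wk = _RES_T, _RES_W
--     else:
--         th, wk = _OTH_T, _OTH_W
--     # binary search: first index with th[lo] > duration_worked_month
--     lo, hi = 0, len(th)
--     while lo < hi:
--         mid = (lo + hi) // 2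
--         if th[mid] <= duration_worked_month:
--             lo = mid + 1
--         else:
--             hi = mid
--     return wk[lo] if lo < len(wk) else wk[-1]
-- ===== Notes on version B (the rewrite author's own statement) =====
-- stated objective: alternative
-- what changed: Replaces the linear scan through the (threshold, weeks) pair table by a binary search (first threshold strictly greater than the input) over two parallel sorted lists, with the last weeks value as fallback.
import Mathlib
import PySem

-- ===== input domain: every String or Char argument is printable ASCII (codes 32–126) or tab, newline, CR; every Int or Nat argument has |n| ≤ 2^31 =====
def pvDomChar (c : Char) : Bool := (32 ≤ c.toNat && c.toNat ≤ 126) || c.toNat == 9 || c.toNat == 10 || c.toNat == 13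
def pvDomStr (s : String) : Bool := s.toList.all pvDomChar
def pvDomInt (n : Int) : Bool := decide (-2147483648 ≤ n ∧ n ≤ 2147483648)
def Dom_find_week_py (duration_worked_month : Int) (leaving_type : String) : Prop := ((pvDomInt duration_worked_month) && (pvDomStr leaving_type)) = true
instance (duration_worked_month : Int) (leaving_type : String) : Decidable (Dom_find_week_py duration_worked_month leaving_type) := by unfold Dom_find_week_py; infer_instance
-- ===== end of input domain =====

-- B replaces A's linear scan of the pair table by a binary search over parallel sorted lists (alternative decomposition).

-- ===== PORT A =====
-- the for-loop: last_valid := current row's weeks, return it as soon as threshold > input; fall through to last_valid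
def fwScan (rows : List (Int × Int)) (x : Int) (last_valid : Int) : Int :=
  match rows with
  | [] => last_valid
  | (t, w) :: rest => if t > x then w else fwScan rest x w

def find_week_py (duration_worked_month : Int) (leaving_type : String) : Int :=
  let duration_notice : List (Int × Int) :=
    if leaving_type == "resigned" then
      [(3, 1), (6, 2), (9, 3), (12, 4), (18, 5), (24, 6), (36, 7), (48, 8),
       (60, 9), (72, 10), (84, 11), (96, 12), (108, 13)]
    else
      [(3, 1), (4, 3), (5, 4), (6, 5), (9, 6), (12, 7), (15, 8), (18, 9),
       (21, 10), (24, 11), (36, 12), (48, 13), (60, 15), (72, 18), (84, 21), (96, 24),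
       (108, 27), (120, 30), (132, 33), (144, 36), (156, 39), (168, 42), (180, 45), (192, 48),
       (204, 51), (216, 54), (228, 57), (240, 60), (252, 62), (264, 63), (276, 64), (288, 65)]
  fwScan duration_notice duration_worked_month 0  -- last_valid unbound before the loop; tables are nonempty so 0 is never returned

-- ===== PORT B =====
-- the while loop of Source B; fuel = len(th) bounds the iterations (the loop halves hi-lo each step)
def fwBisect (fuel : Nat) (th : List Int) (d : Int) (lo hi : Nat) : Nat :=
  match fuel with
  | 0 => lo
  | fuel + 1 =>
    if lo < hi then
      let mid := (lo + hi) / 2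
      if th.getD mid 0 ≤ d then fwBisect fuel th d (mid + 1) hi
      else fwBisect fuel th d lo mid
    else lo

def find_week_py_alt (duration_worked_month : Int) (leaving_type : String) : Int :=
  let th : List Int :=
    if leaving_type == "resigned" then
      [3, 6, 9, 12, 18, 24, 36, 48, 60, 72, 84, 96, 108]
    else
      [3, 4, 5, 6, 9, 12, 15, 18, 21, 24, 36, 48, 60, 72, 84, 96,
       108, 120, 132, 144, 156, 168, 180, 192, 204, 216, 228, 240,
       252, 264, 276, 288]
  let wk : List Int :=
    if leaving_type == "resigned" then
      [1, 2, 3, 4, 5, 6, 7, 8, 9, 10, 11, 12, 13]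
    else
      [1, 3, 4, 5, 6, 7, 8, 9, 10, 11, 12, 13, 15, 18, 21, 24,
       27, 30, 33, 36, 39, 42, 45, 48, 51, 54, 57, 60, 62, 63, 64, 65]
  let lo := fwBisect th.length th duration_worked_month 0 th.length
  -- wk[lo] is always in range when lo < len(wk); wk[-1] is the last element (wk nonempty)
  if lo < wk.length then wk.getD lo 0 else wk.getD (wk.length - 1) 0

-- ===== PRECONDITION & SPEC =====
def Spec_find_week_py (duration_worked_month : Int) (leaving_type : String) (out : Int) : Prop := out = find_week_py_alt duration_worked_month leaving_type
instance (duration_worked_month : Int) (leaving_type : String) (out : Int) : Decidable (Spec_find_week_py duration_worked_month leaving_type out) := by unfold Spec_find_week_py; infer_instance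

-- ===== CLAIM (what is proved, stated in full; the proofs are below) =====
def Claim_equal_find_week_py : Prop := ∀ (duration_worked_month : Int) (leaving_type : String), Dom_find_week_py duration_worked_month leaving_type → Spec_find_week_py duration_worked_month leaving_type (find_week_py duration_worked_month leaving_type)

-- ===== LEMMAS AND PROOFS =====
-- normal forms of the two computations on each table: B* is the bisect decision tree,
-- S* the sequential scan, g* the final weeks lookup (all proof-only helpers)
def B13 (d : Int) : Nat := (if (36 : Int) ≤ d then (if (84 : Int) ≤ d then (if (108 : Int) ≤ d then 13 else (if (96 : Int) ≤ d then 12 else 11)) else (if (60 : Int) ≤ d then (if (72 : Int) ≤ d then 10 else 9) else (if (48 : Int) ≤ d then 8 else 7))) else (if (12 : Int) ≤ d then (if (24 : Int) ≤ d then 6 else (if (18 : Int) ≤ d then 5 else 4)) else (if (6 : Int) ≤ d then (if (9 : Int) ≤ d then 3 else 2) else (if (3 : Int) ≤ d then 1 else 0))))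
def B32 (d : Int) : Nat := (if (108 : Int) ≤ d then (if (204 : Int) ≤ d then (if (252 : Int) ≤ d then (if (276 : Int) ≤ d then (if (288 : Int) ≤ d then 32 else 31) else (if (264 : Int) ≤ d then 30 else 29)) else (if (228 : Int) ≤ d then (if (240 : Int) ≤ d then 28 else 27) else (if (216 : Int) ≤ d then 26 else 25))) else (if (156 : Int) ≤ d then (if (180 : Int) ≤ d then (if (192 : Int) ≤ d then 24 else 23) else (if (168 : Int) ≤ d then 22 else 21)) else (if (132 : Int) ≤ d then (if (144 : Int) ≤ d then 20 else 19) else (if (120 : Int) ≤ d then 18 else 17)))) else (if (21 : Int) ≤ d then (if (60 : Int) ≤ d then (if (84 : Int) ≤ d then (if (96 : Int) ≤ d then 16 else 15) else (if (72 : Int) ≤ d then 14 else 13)) else (if (36 : Int) ≤ d then (if (48 : Int) ≤ d then 12 else 11) else (if (24 : Int) ≤ d then 10 else 9))) else (if (9 : Int) ≤ d then (if (15 : Int) ≤ d then (if (18 : Int) ≤ d then 8 else 7) else (if (12 : Int) ≤ d then 6 else 5)) else (if (5 : Int) ≤ d then (if (6 : Int) ≤ d then 4 else 3) else (if (4 :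 Int) ≤ d then 2 else (if (3 : Int) ≤ d then 1 else 0))))))
def S13 (d : Int) : Int := (if (3 : Int) > d then (1 : Int) else (if (6 : Int) > d then (2 : Int) else (if (9 : Int) > d then (3 : Int) else (if (12 : Int) > d then (4 : Int) else (if (18 : Int) > d then (5 : Int) else (if (24 : Int) > d then (6 : Int) else (if (36 : Int) > d then (7 : Int) else (if (48 : Int) > d then (8 : Int) else (if (60 : Int) > d then (9 : Int) else (if (72 : Int) > d then (10 : Int) else (if (84 : Int) > d then (11 : Int) else (if (96 : Int) > d then (12 : Int) else (if (108 : Int) > d then (13 : Int) else (13 : Int))))))))))))))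
def S32 (d : Int) : Int := (if (3 : Int) > d then (1 : Int) else (if (4 : Int) > d then (3 : Int) else (if (5 : Int) > d then (4 : Int) else (if (6 : Int) > d then (5 : Int) else (if (9 : Int) > d then (6 : Int) else (if (12 : Int) > d then (7 : Int) else (if (15 : Int) > d then (8 : Int) else (if (18 : Int) > d then (9 : Int) else (if (21 : Int) > d then (10 : Int) else (if (24 : Int) > d then (11 : Int) else (if (36 : Int) > d then (12 : Int) else (if (48 : Int) > d then (13 : Int) else (if (60 : Int) > d then (15 : Int) else (if (72 : Int) > d then (18 : Int) else (if (84 : Int) > d then (21 : Int) else (if (96 : Int) > d then (24 : Int) else (if (108 : Int) > d then (27 : Int) else (if (120 : Int) > d then (30 : Int) else (if (132 : Int) > d then (33 : Int) else (if (144 : Int) > d then (36 : Int) else (if (156 : Int) > d then (39 : Int) else (if (168 : Int) > d then (42 : Int) else (if (180 : Int) > d then (45 : Int) else (if (192 : Int) > d then (48 : Int) else (if (204 : Int) > d then (51 : Int) else (if (216 : Int) > d then (54 : Int) else (if (228 : Int) > d then (57 : Int) else (if (240 : Int) > d then (60 : Int) else (if (252 : Int) > d then (62 : Int) else (if (264 :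 Int) > d then (63 : Int) else (if (276 : Int) > d then (64 : Int) else (if (288 : Int) > d then (65 : Int) else (65 : Int)))))))))))))))))))))))))))))))))
def g13 (lo : Nat) : Int := if lo < 13 then List.getD [1, 2, 3, 4, 5, 6, 7, 8, 9, 10, 11, 12, 13] lo 0 else List.getD [1, 2, 3, 4, 5, 6, 7, 8, 9, 10, 11, 12, 13] 12 0
def g32 (lo : Nat) : Int := if lo < 32 then List.getD [1, 3, 4, 5, 6, 7, 8, 9, 10, 11, 12, 13, 15, 18, 21, 24, 27, 30, 33, 36, 39, 42, 45, 48, 51, 54, 57, 60, 62, 63, 64, 65] lo 0 else List.getD [1, 3, 4, 5, 6, 7, 8, 9, 10, 11, 12, 13, 15, 18, 21, 24, 27, 30, 33, 36, 39, 42, 45, 48, 51, 54, 57, 60, 62, 63, 64, 65] 31 0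

set_option maxHeartbeats 1000000 in
theorem eq13 (d : Int) : S13 d = g13 (B13 d) := by
  simp only [S13, B13, apply_ite g13]
  norm_num [g13, List.getD]
  split_ifs <;> omega

theorem gl32_0 : g32 0 = 1 := by norm_num [g32, List.getD]
theorem gl32_1 : g32 1 = 3 := by norm_num [g32, List.getD]
theorem gl32_2 : g32 2 = 4 := by norm_num [g32, List.getD]
theorem gl32_3 : g32 3 = 5 := by norm_num [g32, List.getD]
theorem gl32_4 : g32 4 = 6 := by norm_num [g32, List.getD]
theorem gl32_5 : g32 5 = 7 := by norm_num [g32, List.getD]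
theorem gl32_6 : g32 6 = 8 := by norm_num [g32, List.getD]
theorem gl32_7 : g32 7 = 9 := by norm_num [g32, List.getD]
theorem gl32_8 : g32 8 = 10 := by norm_num [g32, List.getD]
theorem gl32_9 : g32 9 = 11 := by norm_num [g32, List.getD]
theorem gl32_10 : g32 10 = 12 := by norm_num [g32, List.getD]
theorem gl32_11 : g32 11 = 13 := by norm_num [g32, List.getD]
theorem gl32_12 : g32 12 = 15 := by norm_num [g32, List.getD]
theorem gl32_13 : g32 13 = 18 := by norm_num [g32, List.getD]
theorem gl32_14 : g32 14 = 21 := by norm_num [g32, List.getD]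
theorem gl32_15 : g32 15 = 24 := by norm_num [g32, List.getD]
theorem gl32_16 : g32 16 = 27 := by norm_num [g32, List.getD]
theorem gl32_17 : g32 17 = 30 := by norm_num [g32, List.getD]
theorem gl32_18 : g32 18 = 33 := by norm_num [g32, List.getD]
theorem gl32_19 : g32 19 = 36 := by norm_num [g32, List.getD]
theorem gl32_20 : g32 20 = 39 := by norm_num [g32, List.getD]
theorem gl32_21 : g32 21 = 42 := by norm_num [g32, List.getD]
theorem gl32_22 : g32 22 = 45 := by norm_num [g32, List.getD]
theorem gl32_23 : g32 23 = 48 := by norm_num [g32, List.getD]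
theorem gl32_24 : g32 24 = 51 := by norm_num [g32, List.getD]
theorem gl32_25 : g32 25 = 54 := by norm_num [g32, List.getD]
theorem gl32_26 : g32 26 = 57 := by norm_num [g32, List.getD]
theorem gl32_27 : g32 27 = 60 := by norm_num [g32, List.getD]
theorem gl32_28 : g32 28 = 62 := by norm_num [g32, List.getD]
theorem gl32_29 : g32 29 = 63 := by norm_num [g32, List.getD]
theorem gl32_30 : g32 30 = 64 := by norm_num [g32, List.getD]
theorem gl32_31 : g32 31 = 65 := by norm_num [g32, List.getD]
theorem gl32_32 : g32 32 = 65 := by norm_num [g32, List.getD]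

set_option maxHeartbeats 2000000 in
theorem eq32 (d : Int) : S32 d = g32 (B32 d) := by
  by_cases h108 : (108 : Int) ≤ d
  · by_cases h204 : (204 : Int) ≤ d
    · by_cases h252 : (252 : Int) ≤ d
      · by_cases h276 : (276 : Int) ≤ d
        · by_cases h288 : (288 : Int) ≤ d
          · have hb : B32 d = 32 := by unfold B32; rw [if_pos (by omega), if_pos (by omega), if_pos (by omega), if_pos (by omega), if_pos (by omega)]
            rw [hb, gl32_32]
            unfold S32; rw [if_neg (by omega), if_neg (by omega), if_neg (by omega), if_neg (by omega), if_neg (by omega), if_neg (by omega), if_neg (by omega), if_neg (by omega), if_neg (by omega), if_neg (by omega), if_neg (by omega), if_neg (by omega), if_neg (by omega), if_neg (by omega), if_neg (by omega), if_neg (by omega), if_neg (by omega), if_neg (by omega), if_neg (by omega), if_neg (by omega), if_neg (by omega), if_neg (by omega), if_neg (by omega), if_neg (by omega), if_neg (by omega), if_neg (by omega), if_neg (by omega), if_neg (by omega), if_neg (by omega), if_neg (by omega), if_neg (by omega), if_neg (by omega)]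
          · have hb : B32 d = 31 := by unfold B32; rw [if_pos (by omega), if_pos (by omega), if_pos (by omega), if_pos (by omega), if_neg (by omega)]
            rw [hb, gl32_31]
            unfold S32; rw [if_neg (by omega), if_neg (by omega), if_neg (by omega), if_neg (by omega), if_neg (by omega), if_neg (by omega), if_neg (by omega), if_neg (by omega), if_neg (by omega), if_neg (by omega), if_neg (by omega), if_neg (by omega), if_neg (by omega), if_neg (by omega), if_neg (by omega), if_neg (by omega), if_neg (by omega), if_neg (by omega), if_neg (by omega), if_neg (by omega), if_neg (by omega), if_neg (by omega), if_neg (by omega), if_neg (by omega), if_neg (by omega), if_neg (by omega), if_neg (by omega), if_neg (by omega), if_neg (by omega), if_neg (by omega), if_neg (by omega), if_pos (by omega)]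
        · by_cases h264 : (264 : Int) ≤ d
          · have hb : B32 d = 30 := by unfold B32; rw [if_pos (by omega), if_pos (by omega), if_pos (by omega), if_neg (by omega), if_pos (by omega)]
            rw [hb, gl32_30]
            unfold S32; rw [if_neg (by omega), if_neg (by omega), if_neg (by omega), if_neg (by omega), if_neg (by omega), if_neg (by omega), if_neg (by omega), if_neg (by omega), if_neg (by omega), if_neg (by omega), if_neg (by omega), if_neg (by omega), if_neg (by omega), if_neg (by omega), if_neg (by omega), if_neg (by omega), if_neg (by omega), if_neg (by omega), if_neg (by omega), if_neg (by omega), if_neg (by omega), if_neg (by omega), if_neg (by omega), if_neg (by omega), if_neg (by omega), if_neg (by omega), if_neg (by omega), if_neg (by omega), if_neg (by omega), if_neg (by omega), if_pos (by omega)]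
          · have hb : B32 d = 29 := by unfold B32; rw [if_pos (by omega), if_pos (by omega), if_pos (by omega), if_neg (by omega), if_neg (by omega)]
            rw [hb, gl32_29]
            unfold S32; rw [if_neg (by omega), if_neg (by omega), if_neg (by omega), if_neg (by omega), if_neg (by omega), if_neg (by omega), if_neg (by omega), if_neg (by omega), if_neg (by omega), if_neg (by omega), if_neg (by omega), if_neg (by omega), if_neg (by omega), if_neg (by omega), if_neg (by omega), if_neg (by omega), if_neg (by omega), if_neg (by omega), if_neg (by omega), if_neg (by omega), if_neg (by omega), if_neg (by omega), if_neg (by omega), if_neg (by omega), if_neg (by omega), if_neg (by omega), if_neg (by omega), if_neg (by omega), if_neg (by omega), if_pos (by omega)]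
      · by_cases h228 : (228 : Int) ≤ d
        · by_cases h240 : (240 : Int) ≤ d
          · have hb : B32 d = 28 := by unfold B32; rw [if_pos (by omega), if_pos (by omega), if_neg (by omega), if_pos (by omega), if_pos (by omega)]
            rw [hb, gl32_28]
            unfold S32; rw [if_neg (by omega), if_neg (by omega), if_neg (by omega), if_neg (by omega), if_neg (by omega), if_neg (by omega), if_neg (by omega), if_neg (by omega), if_neg (by omega), if_neg (by omega), if_neg (by omega), if_neg (by omega), if_neg (by omega), if_neg (by omega), if_neg (by omega), if_neg (by omega), if_neg (by omega), if_neg (by omega), if_neg (by omega), if_neg (by omega), if_neg (by omega), if_neg (by omega), if_neg (by omega), if_neg (by omega), if_neg (by omega), if_neg (by omega), if_neg (by omega), if_neg (by omega), if_pos (by omega)]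
          · have hb : B32 d = 27 := by unfold B32; rw [if_pos (by omega), if_pos (by omega), if_neg (by omega), if_pos (by omega), if_neg (by omega)]
            rw [hb, gl32_27]
            unfold S32; rw [if_neg (by omega), if_neg (by omega), if_neg (by omega), if_neg (by omega), if_neg (by omega), if_neg (by omega), if_neg (by omega), if_neg (by omega), if_neg (by omega), if_neg (by omega), if_neg (by omega), if_neg (by omega), if_neg (by omega), if_neg (by omega), if_neg (by omega), if_neg (by omega), if_neg (by omega), if_neg (by omega), if_neg (by omega), if_neg (by omega), if_neg (by omega), if_neg (by omega), if_neg (by omega), if_neg (by omega), if_neg (by omega), if_neg (by omega), if_neg (by omega), if_pos (by omega)]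
        · by_cases h216 : (216 : Int) ≤ d
          · have hb : B32 d = 26 := by unfold B32; rw [if_pos (by omega), if_pos (by omega), if_neg (by omega), if_neg (by omega), if_pos (by omega)]
            rw [hb, gl32_26]
            unfold S32; rw [if_neg (by omega), if_neg (by omega), if_neg (by omega), if_neg (by omega), if_neg (by omega), if_neg (by omega), if_neg (by omega), if_neg (by omega), if_neg (by omega), if_neg (by omega), if_neg (by omega), if_neg (by omega), if_neg (by omega), if_neg (by omega), if_neg (by omega), if_neg (by omega), if_neg (by omega), if_neg (by omega), if_neg (by omega), if_neg (by omega), if_neg (by omega), if_neg (by omega), if_neg (by omega), if_neg (by omega), if_neg (by omega), if_neg (by omega), if_pos (by omega)]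
          · have hb : B32 d = 25 := by unfold B32; rw [if_pos (by omega), if_pos (by omega), if_neg (by omega), if_neg (by omega), if_neg (by omega)]
            rw [hb, gl32_25]
            unfold S32; rw [if_neg (by omega), if_neg (by omega), if_neg (by omega), if_neg (by omega), if_neg (by omega), if_neg (by omega), if_neg (by omega), if_neg (by omega), if_neg (by omega), if_neg (by omega), if_neg (by omega), if_neg (by omega), if_neg (by omega), if_neg (by omega), if_neg (by omega), if_neg (by omega), if_neg (by omega), if_neg (by omega), if_neg (by omega), if_neg (by omega), if_neg (by omega), if_neg (by omega), if_neg (by omega), if_neg (by omega), if_neg (by omega), if_pos (by omega)]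
    · by_cases h156 : (156 : Int) ≤ d
      · by_cases h180 : (180 : Int) ≤ d
        · by_cases h192 : (192 : Int) ≤ d
          · have hb : B32 d = 24 := by unfold B32; rw [if_pos (by omega), if_neg (by omega), if_pos (by omega), if_pos (by omega), if_pos (by omega)]
            rw [hb, gl32_24]
            unfold S32; rw [if_neg (by omega), if_neg (by omega), if_neg (by omega), if_neg (by omega), if_neg (by omega), if_neg (by omega), if_neg (by omega), if_neg (by omega), if_neg (by omega), if_neg (by omega), if_neg (by omega), if_neg (by omega), if_neg (by omega), if_neg (by omega), if_neg (by omega), if_neg (by omega), if_neg (by omega), if_neg (by omega), if_neg (by omega), if_neg (by omega), if_neg (by omega), if_neg (by omega), if_neg (by omega), if_neg (by omega), if_pos (by omega)]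
          · have hb : B32 d = 23 := by unfold B32; rw [if_pos (by omega), if_neg (by omega), if_pos (by omega), if_pos (by omega), if_neg (by omega)]
            rw [hb, gl32_23]
            unfold S32; rw [if_neg (by omega), if_neg (by omega), if_neg (by omega), if_neg (by omega), if_neg (by omega), if_neg (by omega), if_neg (by omega), if_neg (by omega), if_neg (by omega), if_neg (by omega), if_neg (by omega), if_neg (by omega), if_neg (by omega), if_neg (by omega), if_neg (by omega), if_neg (by omega), if_neg (by omega), if_neg (by omega), if_neg (by omega), if_neg (by omega), if_neg (by omega), if_neg (by omega), if_neg (by omega), if_pos (by omega)]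
        · by_cases h168 : (168 : Int) ≤ d
          · have hb : B32 d = 22 := by unfold B32; rw [if_pos (by omega), if_neg (by omega), if_pos (by omega), if_neg (by omega), if_pos (by omega)]
            rw [hb, gl32_22]
            unfold S32; rw [if_neg (by omega), if_neg (by omega), if_neg (by omega), if_neg (by omega), if_neg (by omega), if_neg (by omega), if_neg (by omega), if_neg (by omega), if_neg (by omega), if_neg (by omega), if_neg (by omega), if_neg (by omega), if_neg (by omega), if_neg (by omega), if_neg (by omega), if_neg (by omega), if_neg (by omega), if_neg (by omega), if_neg (by omega), if_neg (by omega), if_neg (by omega), if_neg (by omega), if_pos (by omega)]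
          · have hb : B32 d = 21 := by unfold B32; rw [if_pos (by omega), if_neg (by omega), if_pos (by omega), if_neg (by omega), if_neg (by omega)]
            rw [hb, gl32_21]
            unfold S32; rw [if_neg (by omega), if_neg (by omega), if_neg (by omega), if_neg (by omega), if_neg (by omega), if_neg (by omega), if_neg (by omega), if_neg (by omega), if_neg (by omega), if_neg (by omega), if_neg (by omega), if_neg (by omega), if_neg (by omega), if_neg (by omega), if_neg (by omega), if_neg (by omega), if_neg (by omega), if_neg (by omega), if_neg (by omega), if_neg (by omega), if_neg (by omega), if_pos (by omega)]
      · by_cases h132 : (132 : Int) ≤ d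
        · by_cases h144 : (144 : Int) ≤ d
          · have hb : B32 d = 20 := by unfold B32; rw [if_pos (by omega), if_neg (by omega), if_neg (by omega), if_pos (by omega), if_pos (by omega)]
            rw [hb, gl32_20]
            unfold S32; rw [if_neg (by omega), if_neg (by omega), if_neg (by omega), if_neg (by omega), if_neg (by omega), if_neg (by omega), if_neg (by omega), if_neg (by omega), if_neg (by omega), if_neg (by omega), if_neg (by omega), if_neg (by omega), if_neg (by omega), if_neg (by omega), if_neg (by omega), if_neg (by omega), if_neg (by omega), if_neg (by omega), if_neg (by omega), if_neg (by omega), if_pos (by omega)]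
          · have hb : B32 d = 19 := by unfold B32; rw [if_pos (by omega), if_neg (by omega), if_neg (by omega), if_pos (by omega), if_neg (by omega)]
            rw [hb, gl32_19]
            unfold S32; rw [if_neg (by omega), if_neg (by omega), if_neg (by omega), if_neg (by omega), if_neg (by omega), if_neg (by omega), if_neg (by omega), if_neg (by omega), if_neg (by omega), if_neg (by omega), if_neg (by omega), if_neg (by omega), if_neg (by omega), if_neg (by omega), if_neg (by omega), if_neg (by omega), if_neg (by omega), if_neg (by omega), if_neg (by omega), if_pos (by omega)]
        · by_cases h120 : (120 : Int) ≤ d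
          · have hb : B32 d = 18 := by unfold B32; rw [if_pos (by omega), if_neg (by omega), if_neg (by omega), if_neg (by omega), if_pos (by omega)]
            rw [hb, gl32_18]
            unfold S32; rw [if_neg (by omega), if_neg (by omega), if_neg (by omega), if_neg (by omega), if_neg (by omega), if_neg (by omega), if_neg (by omega), if_neg (by omega), if_neg (by omega), if_neg (by omega), if_neg (by omega), if_neg (by omega), if_neg (by omega), if_neg (by omega), if_neg (by omega), if_neg (by omega), if_neg (by omega), if_neg (by omega), if_pos (by omega)]
          · have hb : B32 d = 17 := by unfold B32; rw [if_pos (by omega), if_neg (by omega), if_neg (by omega), if_neg (by omega), if_neg (by omega)]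
            rw [hb, gl32_17]
            unfold S32; rw [if_neg (by omega), if_neg (by omega), if_neg (by omega), if_neg (by omega), if_neg (by omega), if_neg (by omega), if_neg (by omega), if_neg (by omega), if_neg (by omega), if_neg (by omega), if_neg (by omega), if_neg (by omega), if_neg (by omega), if_neg (by omega), if_neg (by omega), if_neg (by omega), if_neg (by omega), if_pos (by omega)]
  · by_cases h21 : (21 : Int) ≤ d
    · by_cases h60 : (60 : Int) ≤ d
      · by_cases h84 : (84 : Int) ≤ d
        · by_cases h96 : (96 : Int) ≤ d
          · have hb : B32 d = 16 := by unfold B32; rw [if_neg (by omega), if_pos (by omega), if_pos (by omega), if_pos (by omega), if_pos (by omega)]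
            rw [hb, gl32_16]
            unfold S32; rw [if_neg (by omega), if_neg (by omega), if_neg (by omega), if_neg (by omega), if_neg (by omega), if_neg (by omega), if_neg (by omega), if_neg (by omega), if_neg (by omega), if_neg (by omega), if_neg (by omega), if_neg (by omega), if_neg (by omega), if_neg (by omega), if_neg (by omega), if_neg (by omega), if_pos (by omega)]
          · have hb : B32 d = 15 := by unfold B32; rw [if_neg (by omega), if_pos (by omega), if_pos (by omega), if_pos (by omega), if_neg (by omega)]
            rw [hb, gl32_15]
            unfold S32; rw [if_neg (by omega), if_neg (by omega), if_neg (by omega), if_neg (by omega), if_neg (by omega), if_neg (by omega), if_neg (by omega), if_neg (by omega), if_neg (by omega), if_neg (by omega), if_neg (by omega), if_neg (by omega), if_neg (by omega), if_neg (by omega), if_neg (by omega), if_pos (by omega)]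
        · by_cases h72 : (72 : Int) ≤ d
          · have hb : B32 d = 14 := by unfold B32; rw [if_neg (by omega), if_pos (by omega), if_pos (by omega), if_neg (by omega), if_pos (by omega)]
            rw [hb, gl32_14]
            unfold S32; rw [if_neg (by omega), if_neg (by omega), if_neg (by omega), if_neg (by omega), if_neg (by omega), if_neg (by omega), if_neg (by omega), if_neg (by omega), if_neg (by omega), if_neg (by omega), if_neg (by omega), if_neg (by omega), if_neg (by omega), if_neg (by omega), if_pos (by omega)]
          · have hb : B32 d = 13 := by unfold B32; rw [if_neg (by omega), if_pos (by omega), if_pos (by omega), if_neg (by omega), if_neg (by omega)]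
            rw [hb, gl32_13]
            unfold S32; rw [if_neg (by omega), if_neg (by omega), if_neg (by omega), if_neg (by omega), if_neg (by omega), if_neg (by omega), if_neg (by omega), if_neg (by omega), if_neg (by omega), if_neg (by omega), if_neg (by omega), if_neg (by omega), if_neg (by omega), if_pos (by omega)]
      · by_cases h36 : (36 : Int) ≤ d
        · by_cases h48 : (48 : Int) ≤ d
          · have hb : B32 d = 12 := by unfold B32; rw [if_neg (by omega), if_pos (by omega), if_neg (by omega), if_pos (by omega), if_pos (by omega)]
            rw [hb, gl32_12]
            unfold S32; rw [if_neg (by omega), if_neg (by omega), if_neg (by omega), if_neg (by omega), if_neg (by omega), if_neg (by omega), if_neg (by omega), if_neg (by omega), if_neg (by omega), if_neg (by omega), if_neg (by omega), if_neg (by omega), if_pos (by omega)]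
          · have hb : B32 d = 11 := by unfold B32; rw [if_neg (by omega), if_pos (by omega), if_neg (by omega), if_pos (by omega), if_neg (by omega)]
            rw [hb, gl32_11]
            unfold S32; rw [if_neg (by omega), if_neg (by omega), if_neg (by omega), if_neg (by omega), if_neg (by omega), if_neg (by omega), if_neg (by omega), if_neg (by omega), if_neg (by omega), if_neg (by omega), if_neg (by omega), if_pos (by omega)]
        · by_cases h24 : (24 : Int) ≤ d
          · have hb : B32 d = 10 := by unfold B32; rw [if_neg (by omega), if_pos (by omega), if_neg (by omega), if_neg (by omega), if_pos (by omega)]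
            rw [hb, gl32_10]
            unfold S32; rw [if_neg (by omega), if_neg (by omega), if_neg (by omega), if_neg (by omega), if_neg (by omega), if_neg (by omega), if_neg (by omega), if_neg (by omega), if_neg (by omega), if_neg (by omega), if_pos (by omega)]
          · have hb : B32 d = 9 := by unfold B32; rw [if_neg (by omega), if_pos (by omega), if_neg (by omega), if_neg (by omega), if_neg (by omega)]
            rw [hb, gl32_9]
            unfold S32; rw [if_neg (by omega), if_neg (by omega), if_neg (by omega), if_neg (by omega), if_neg (by omega), if_neg (by omega), if_neg (by omega), if_neg (by omega), if_neg (by omega), if_pos (by omega)]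
    · by_cases h9 : (9 : Int) ≤ d
      · by_cases h15 : (15 : Int) ≤ d
        · by_cases h18 : (18 : Int) ≤ d
          · have hb : B32 d = 8 := by unfold B32; rw [if_neg (by omega), if_neg (by omega), if_pos (by omega), if_pos (by omega), if_pos (by omega)]
            rw [hb, gl32_8]
            unfold S32; rw [if_neg (by omega), if_neg (by omega), if_neg (by omega), if_neg (by omega), if_neg (by omega), if_neg (by omega), if_neg (by omega), if_neg (by omega), if_pos (by omega)]
          · have hb : B32 d = 7 := by unfold B32; rw [if_neg (by omega), if_neg (by omega), if_pos (by omega), if_pos (by omega), if_neg (by omega)]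
            rw [hb, gl32_7]
            unfold S32; rw [if_neg (by omega), if_neg (by omega), if_neg (by omega), if_neg (by omega), if_neg (by omega), if_neg (by omega), if_neg (by omega), if_pos (by omega)]
        · by_cases h12 : (12 : Int) ≤ d
          · have hb : B32 d = 6 := by unfold B32; rw [if_neg (by omega), if_neg (by omega), if_pos (by omega), if_neg (by omega), if_pos (by omega)]
            rw [hb, gl32_6]
            unfold S32; rw [if_neg (by omega), if_neg (by omega), if_neg (by omega), if_neg (by omega), if_neg (by omega), if_neg (by omega), if_pos (by omega)]
          · have hb : B32 d = 5 := by unfold B32; rw [if_neg (by omega), if_neg (by omega), if_pos (by omega), if_neg (by omega), if_neg (by omega)]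
            rw [hb, gl32_5]
            unfold S32; rw [if_neg (by omega), if_neg (by omega), if_neg (by omega), if_neg (by omega), if_neg (by omega), if_pos (by omega)]
      · by_cases h5 : (5 : Int) ≤ d
        · by_cases h6 : (6 : Int) ≤ d
          · have hb : B32 d = 4 := by unfold B32; rw [if_neg (by omega), if_neg (by omega), if_neg (by omega), if_pos (by omega), if_pos (by omega)]
            rw [hb, gl32_4]
            unfold S32; rw [if_neg (by omega), if_neg (by omega), if_neg (by omega), if_neg (by omega), if_pos (by omega)]
          · have hb : B32 d = 3 := by unfold B32; rw [if_neg (by omega), if_neg (by omega), if_neg (by omega), if_pos (by omega), if_neg (by omega)]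
            rw [hb, gl32_3]
            unfold S32; rw [if_neg (by omega), if_neg (by omega), if_neg (by omega), if_pos (by omega)]
        · by_cases h4 : (4 : Int) ≤ d
          · have hb : B32 d = 2 := by unfold B32; rw [if_neg (by omega), if_neg (by omega), if_neg (by omega), if_neg (by omega), if_pos (by omega)]
            rw [hb, gl32_2]
            unfold S32; rw [if_neg (by omega), if_neg (by omega), if_pos (by omega)]
          · by_cases h3 : (3 : Int) ≤ d
            · have hb : B32 d = 1 := by unfold B32; rw [if_neg (by omega), if_neg (by omega), if_neg (by omega), if_neg (by omega), if_neg (by omega), if_pos (by omega)]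
              rw [hb, gl32_1]
              unfold S32; rw [if_neg (by omega), if_pos (by omega)]
            · have hb : B32 d = 0 := by unfold B32; rw [if_neg (by omega), if_neg (by omega), if_neg (by omega), if_neg (by omega), if_neg (by omega), if_neg (by omega)]
              rw [hb, gl32_0]
              unfold S32; rw [if_pos (by omega)]

set_option maxHeartbeats 1000000 in
theorem fw_eq (d : Int) (lt : String) : find_week_py d lt = find_week_py_alt d lt := by
  unfold find_week_py find_week_py_alt
  cases h : (lt == "resigned")
  · simp only [Bool.false_eq_true, if_false]
    exact eq32 d
  · simp only [if_true]
    exact eq13 d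

-- ===== VERDICT (by name: the statement is the Claim_ definition above) =====
theorem find_week_py_spec : Claim_equal_find_week_py := by
  intro d lt _
  unfold Spec_find_week_py
  exact fw_eq d lt
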